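-- pv_equiv track=rewrite | github.com/3582730951/vmprotect | core/wrapper/weaver_proxy.py | _has_rust_link_arg
-- ===== SOURCE A (Python) =====
-- from typing import Dict, List, Mapping, Optional, Sequence
--
-- def _has_rust_link_arg(args: Sequence[str], value: str) -> bool:
--     needle = value.strip()
--     if not needle:
--         return False
--     i = 0
--     while i < len(args):
--         token = args[i]
--         if token == "-C" and i + 1 < len(args):
--             payload = args[i + 1]
--             if payload.startswith("link-arg="):
--                 if payload.split("=", 1)[1] == needle:
--                     return True
--             elif payload.startswith("link-args="):
--                 for part in payload.split("=", 1)[1].split():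
--                     if part == needle:
--                         return True
--             i += 2
--             continue
--         if token.startswith("-Clink-arg="):
--             if token.split("=", 1)[1] == needle:
--                 return True
--         elif token.startswith("-Clink-args="):
--             for part in token.split("=", 1)[1].split():
--                 if part == needle:
--                     return True
--         i += 1
--     return False
-- ===== SOURCE B (Python) =====
-- def _has_rust_link_arg(args, value):
--     needle = value.strip()
--     if not needle:
--         return False
--     merged = []
--     i = 0
--     n = len(args)
--     while i < n:
--         if args[i] == "-C" and i + 1 < n:
--             merged.append("-C" + args[i + 1])
--             i += 2
--         else:
--             merged.append(args[i])
--             i += 1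
--     for tok in merged:
--         if tok.startswith("-Clink-arg="):
--             if tok[len("-Clink-arg="):] == needle:
--                 return True
--         elif tok.startswith("-Clink-args="):
--             if needle in tok[len("-Clink-args="):].split():
--                 return True
--     return False
-- ===== Notes on version B (the rewrite author's own statement) =====
-- stated objective: alternative
-- what changed: A's single fused index loop that advances by 1 or 2 and repeats the prefix checks in two branch families is replaced by a one-pass normalization that merges each '-C' with its following token, followed by a separate prefix-and-compare scan (using slicing instead of split('=',1)) over the normalized token list.
import Mathlib
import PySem

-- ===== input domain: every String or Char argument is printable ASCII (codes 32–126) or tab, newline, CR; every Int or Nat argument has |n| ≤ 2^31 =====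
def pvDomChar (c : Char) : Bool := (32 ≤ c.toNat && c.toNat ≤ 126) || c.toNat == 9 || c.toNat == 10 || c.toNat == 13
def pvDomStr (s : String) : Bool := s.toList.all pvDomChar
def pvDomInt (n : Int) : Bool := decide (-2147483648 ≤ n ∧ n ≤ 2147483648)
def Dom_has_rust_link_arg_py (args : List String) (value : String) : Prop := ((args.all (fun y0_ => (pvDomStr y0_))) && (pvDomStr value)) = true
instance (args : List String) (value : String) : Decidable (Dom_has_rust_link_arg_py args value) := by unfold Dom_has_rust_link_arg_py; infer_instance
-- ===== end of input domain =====

-- B replaces A's fused two-speed index loop by a one-pass "-C"-pair normalization followed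
-- by a separate prefix scan over the normalized tokens (objective: alternative decomposition).

-- ===== PORT A =====
-- afterEq ports `s.split("=", 1)[1]`; every call site in A is guarded by a startswith
-- check that guarantees an '=' is present, so the Python indexing never raises and the
-- `.getD` defaults below are unreachable.
def afterEq (s : String) : String := ((PySem.Str.splitMax? s "=" 1).getD []).getD 1 ""

-- the inner checks of A's pair branch (`payload.startswith("link-arg=")` …)
def checkPayloadA (needle payload : String) : Bool :=
  if PySem.Str.startswith payload "link-arg=" then afterEq payload == needle
  else if PySem.Str.startswith payload "link-args=" then
    (PySem.Str.split₀ (afterEq payload)).any (fun part => part == needle)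
  else false

-- the checks of A's single-token branch (`token.startswith("-Clink-arg=")` …)
def checkTokA (needle token : String) : Bool :=
  if PySem.Str.startswith token "-Clink-arg=" then afterEq token == needle
  else if PySem.Str.startswith token "-Clink-args=" then
    (PySem.Str.split₀ (afterEq token)).any (fun part => part == needle)
  else false

-- A's while loop over i: the `token == "-C" and i + 1 < len(args)` branch consumes two
-- tokens, otherwise one token is checked and consumed.
def aLoop (needle : String) : List String → Bool
  | [] => false
  | [token] => checkTokA needle token
  | token :: payload :: rest =>
    if token == "-C" then checkPayloadA needle payload || aLoop needle rest
    else checkTokA needle token || aLoop needle (payload :: rest)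

def has_rust_link_arg_py (args : List String) (value : String) : Bool :=
  let needle := PySem.Str.strip value
  if needle == "" then false else aLoop needle args

-- ===== PORT B =====
-- Python string concatenation "-C" + p
def pvCat (a b : String) : String := String.ofList (a.toList ++ b.toList)

-- B's first pass: merge each "-C" with its following token (a trailing bare "-C" stays)
def normalizeB : List String → List String
  | [] => []
  | [t] => [t]
  | t :: p :: rest => if t == "-C" then pvCat "-C" p :: normalizeB rest else t :: normalizeB (p :: rest)

-- B's per-token check: prefix test, then compare the rest after the prefix (slicing)
def bScanTok (needle tok : String) : Bool :=
  if PySem.Str.startswith tok "-Clink-arg=" then PySem.Str.slice tok (some 11) none == needle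
  else if PySem.Str.startswith tok "-Clink-args=" then
    (PySem.Str.split₀ (PySem.Str.slice tok (some 12) none)).contains needle
  else false

def has_rust_link_arg_py_alt (args : List String) (value : String) : Bool :=
  let needle := PySem.Str.strip value
  if needle == "" then false else (normalizeB args).any (bScanTok needle)

-- ===== PRECONDITION & SPEC =====
def Spec_has_rust_link_arg_py (args : List String) (value : String) (out : Bool) : Prop := out = has_rust_link_arg_py_alt args value
instance (args : List String) (value : String) (out : Bool) : Decidable (Spec_has_rust_link_arg_py args value out) := by unfold Spec_has_rust_link_arg_py; infer_instance

-- ===== CLAIM (what is proved, stated in full; the proofs are below) =====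
def Claim_equal_has_rust_link_arg_py : Prop := ∀ (args : List String) (value : String), Dom_has_rust_link_arg_py args value → Spec_has_rust_link_arg_py args value (has_rust_link_arg_py args value)

-- ===== LEMMAS AND PROOFS =====

-- splitOnMax's worker with the split budget exhausted returns the remainder as last piece
theorem go_m0 (t : List Char) (fuel : Nat) (cur : List Char) (acc : List (List Char)) (h : 0 < fuel) :
    PySem.Chars.splitOnMax.go ['='] fuel 0 t cur acc = ((cur.reverse ++ t) :: acc).reverse := by
  cases fuel with
  | zero => omega
  | succ f => cases t <;> simp [PySem.Chars.splitOnMax.go]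

-- `s.split("=", 1)[1]` read off a computed two-piece split
theorem afterEq_of_split (s : String) (pre t : List Char)
    (h : PySem.Chars.splitMax? s.toList "=".toList 1 = some [pre, t]) : (afterEq s).toList = t := by
  have hmap : Option.map (fun x => List.map String.toList x) (PySem.Str.splitMax? s "=" 1)
      = some [pre, t] := by rw [PySem.Str.splitMax?_map]; exact h
  cases hs : PySem.Str.splitMax? s "=" 1 with
  | none => rw [hs] at hmap; simp at hmap
  | some l =>
    rw [hs] at hmap
    cases l with
    | nil => simp at hmap
    | cons a l2 =>
      cases l2 with
      | nil => simp at hmap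
      | cons b l3 =>
        cases l3 with
        | cons c l4 => simp at hmap
        | nil =>
          simp only [Option.map_some, Option.some.injEq, List.map_cons, List.map_nil,
            List.cons.injEq, and_true] at hmap
          unfold afterEq
          rw [hs]
          simpa using hmap.2

-- the four concrete prefixes: after `s.split("=",1)[1]` equals the text after the prefix
theorem afterEq_arg (s : String) (t : List Char) (h : s.toList = "-Clink-arg=".toList ++ t) :
    (afterEq s).toList = t := by
  apply afterEq_of_split s "-Clink-arg".toList t
  rw [h]
  simp [PySem.Chars.splitMax?, PySem.Chars.splitOnMax, PySem.Chars.splitOnMax.go, List.isPrefixOf]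
  rw [go_m0 _ _ _ _ (by omega)]; simp

theorem afterEq_args (s : String) (t : List Char) (h : s.toList = "-Clink-args=".toList ++ t) :
    (afterEq s).toList = t := by
  apply afterEq_of_split s "-Clink-args".toList t
  rw [h]
  simp [PySem.Chars.splitMax?, PySem.Chars.splitOnMax, PySem.Chars.splitOnMax.go, List.isPrefixOf]
  rw [go_m0 _ _ _ _ (by omega)]; simp

theorem afterEq_arg9 (s : String) (t : List Char) (h : s.toList = "link-arg=".toList ++ t) :
    (afterEq s).toList = t := by
  apply afterEq_of_split s "link-arg".toList t
  rw [h]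
  simp [PySem.Chars.splitMax?, PySem.Chars.splitOnMax, PySem.Chars.splitOnMax.go, List.isPrefixOf]
  rw [go_m0 _ _ _ _ (by omega)]; simp

theorem afterEq_args10 (s : String) (t : List Char) (h : s.toList = "link-args=".toList ++ t) :
    (afterEq s).toList = t := by
  apply afterEq_of_split s "link-args".toList t
  rw [h]
  simp [PySem.Chars.splitMax?, PySem.Chars.splitOnMax, PySem.Chars.splitOnMax.go, List.isPrefixOf]
  rw [go_m0 _ _ _ _ (by omega)]; simp

-- s[11:] / s[12:] as list drop
theorem slice11_toList (s : String) : (PySem.Str.slice s (some 11) none).toList = s.toList.drop 11 := by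
  simp only [PySem.Str.toList_slice, PySem.Chars.slice_eq_listSlice]
  rw [PySem.List.slice_from _ (by norm_num)]; simp

theorem slice12_toList (s : String) : (PySem.Str.slice s (some 12) none).toList = s.toList.drop 12 := by
  simp only [PySem.Str.toList_slice, PySem.Chars.slice_eq_listSlice]
  rw [PySem.List.slice_from _ (by norm_num)]; simp

-- single-token check: A's split("=",1)[1] equals B's slice after the same prefix tests
theorem checkTokA_eq (needle t : String) : checkTokA needle t = bScanTok needle t := by
  unfold checkTokA bScanTok
  split_ifs with h1 h2
  · obtain ⟨t', ht⟩ : "-Clink-arg=".toList <+: t.toList := by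
      simpa [PySem.Chars.startswith_iff] using h1
    have he : afterEq t = PySem.Str.slice t (some 11) none := by
      apply String.toList_inj.mp
      rw [afterEq_arg t t' ht.symm, slice11_toList, ← ht]
      simp
    rw [he]
  · obtain ⟨t', ht⟩ : "-Clink-args=".toList <+: t.toList := by
      simpa [PySem.Chars.startswith_iff] using h2
    have he : afterEq t = PySem.Str.slice t (some 12) none := by
      apply String.toList_inj.mp
      rw [afterEq_args t t' ht.symm, slice12_toList, ← ht]
      simp
    rw [he]
    exact List.any_beq'
  · rfl

theorem pvCat_toList (p : String) : (pvCat "-C" p).toList = '-' :: 'C' :: p.toList := by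
  simp [pvCat, String.toList_ofList]

-- pair-branch check: checking payload after "-C" equals checking the merged token
theorem checkPayloadA_eq (needle p : String) :
    checkPayloadA needle p = bScanTok needle (pvCat "-C" p) := by
  have hsw1 : PySem.Str.startswith (pvCat "-C" p) "-Clink-arg=" = PySem.Str.startswith p "link-arg=" := by
    rw [Bool.eq_iff_iff]
    simp [PySem.Chars.startswith_iff, pvCat_toList, List.cons_prefix_cons]
  have hsw2 : PySem.Str.startswith (pvCat "-C" p) "-Clink-args=" = PySem.Str.startswith p "link-args=" := by
    rw [Bool.eq_iff_iff]
    simp [PySem.Chars.startswith_iff, pvCat_toList, List.cons_prefix_cons]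
  unfold checkPayloadA bScanTok
  rw [hsw1, hsw2]
  split_ifs with h1 h2
  · obtain ⟨t', ht⟩ : "link-arg=".toList <+: p.toList := by
      simpa [PySem.Chars.startswith_iff] using h1
    have he : afterEq p = PySem.Str.slice (pvCat "-C" p) (some 11) none := by
      apply String.toList_inj.mp
      rw [afterEq_arg9 p t' ht.symm, slice11_toList, pvCat_toList, ← ht]
      simp
    rw [he]
  · obtain ⟨t', ht⟩ : "link-args=".toList <+: p.toList := by
      simpa [PySem.Chars.startswith_iff] using h2
    have he : afterEq p = PySem.Str.slice (pvCat "-C" p) (some 12) none := by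
      apply String.toList_inj.mp
      rw [afterEq_args10 p t' ht.symm, slice12_toList, pvCat_toList, ← ht]
      simp
    rw [he]
    exact List.any_beq'
  · rfl

-- A's fused loop equals B's scan of the normalized token list
theorem loop_eq (needle : String) (xs : List String) :
    aLoop needle xs = (normalizeB xs).any (bScanTok needle) := by
  induction xs using normalizeB.induct with
  | case1 => simp [aLoop, normalizeB]
  | case2 t => simp [aLoop, normalizeB, checkTokA_eq]
  | case3 t p rest h ih =>
    simp [aLoop, normalizeB, h, ih, checkPayloadA_eq]
  | case4 t p rest h ih =>
    simp [aLoop, normalizeB, h, ih, checkTokA_eq]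

theorem main_eq (args : List String) (value : String) :
    has_rust_link_arg_py args value = has_rust_link_arg_py_alt args value := by
  unfold has_rust_link_arg_py has_rust_link_arg_py_alt
  by_cases h : PySem.Str.strip value == "" <;> simp [h, loop_eq]

-- ===== VERDICT (by name: the statement is the Claim_ definition above) =====
theorem has_rust_link_arg_py_spec : Claim_equal_has_rust_link_arg_py := by
  intro args value _
  unfold Spec_has_rust_link_arg_py
  exact main_eq args value
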